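-- pv_equiv track=rewrite | github.com/bmolodan/cmp-rpm | compare_rpm_sizes.py | normalize_lib_paths
-- ===== SOURCE A (Python) =====
-- def normalize_lib_paths(path: str) -> str:
--     """Normalize library directory prefixes for RPM paths.
--
--     RPM entries often begin with ``./``. Only those prefixes are handled and no
--     attempt is made to deal with absolute paths.
--     """
--     replacements = [
--         ("./lib64/", "./lib/"),
--         ("./lib32/", "./lib/"),
--         ("./usr/lib64/", "./usr/lib/"),
--         ("./usr/lib32/", "./usr/lib/"),
--     ]
--     for old, new in replacements:
--         if path.startswith(old):
--             return new + path[len(old):]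
--     return path
-- ===== SOURCE B (Python) =====
-- def normalize_lib_paths(path: str) -> str:
--     """Normalize library directory prefixes for RPM paths.
--
--     Component-peeling form: strip the leading './', optionally consume a
--     'usr/' segment, and if the next segment is 'lib64/' or 'lib32/' rebuild
--     the path with 'lib/' in its place; otherwise return the path unchanged.
--     """
--     if not path.startswith("./"):
--         return path
--     rest = path[2:]
--     mid = ""
--     if rest.startswith("usr/"):
--         mid = "usr/"
--         rest = rest[4:]
--     if rest.startswith("lib64/") or rest.startswith("lib32/"):
--         return "./" + mid + "lib/" + rest[6:]
--     return path
-- ===== Notes on version B (the rewrite author's own statement) =====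
-- stated objective: simpler
-- what changed: Replaces the four-entry replacement-table loop with component peeling: strip the leading dot-slash, optionally consume a usr component, and rewrite a single lib64-or-lib32 segment to lib.
import Mathlib
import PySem

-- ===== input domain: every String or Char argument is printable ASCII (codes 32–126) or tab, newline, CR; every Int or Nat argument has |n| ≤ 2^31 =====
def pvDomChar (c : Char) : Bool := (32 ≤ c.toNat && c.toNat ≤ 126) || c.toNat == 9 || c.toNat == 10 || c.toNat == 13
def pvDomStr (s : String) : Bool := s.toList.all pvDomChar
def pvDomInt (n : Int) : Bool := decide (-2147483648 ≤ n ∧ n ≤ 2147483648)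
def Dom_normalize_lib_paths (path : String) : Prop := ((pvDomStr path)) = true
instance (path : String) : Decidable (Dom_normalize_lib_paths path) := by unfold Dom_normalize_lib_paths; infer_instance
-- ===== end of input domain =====

-- B peels path components ('./', optional 'usr/', one 'libNN/' segment) instead of
-- scanning A's four-entry replacement table; objective: simpler. Same return value.

-- ===== PORT A =====
-- the 'for old, new in replacements' loop with its early return
def normAloop (reps : List (List Char × List Char)) (path : String) : String :=
  match reps with
  | [] => path
  | (old, new) :: rest =>
      if PySem.Chars.startswith path.toList old then
        String.ofList (new ++ PySem.Chars.slice path.toList (some (old.length : Int)) none)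
      else normAloop rest path

def normalize_lib_paths (path : String) : String :=
  normAloop [("./lib64/".toList, "./lib/".toList),
             ("./lib32/".toList, "./lib/".toList),
             ("./usr/lib64/".toList, "./usr/lib/".toList),
             ("./usr/lib32/".toList, "./usr/lib/".toList)] path

-- ===== PORT B =====
def normalize_lib_paths_alt (path : String) : String :=
  if ¬ PySem.Chars.startswith path.toList "./".toList then path
  else
    let rest0 := PySem.Chars.slice path.toList (some ((2:Nat):Int)) none
    let mr : List Char × List Char :=
      if PySem.Chars.startswith rest0 "usr/".toList
      then ("usr/".toList, PySem.Chars.slice rest0 (some ((4:Nat):Int)) none)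
      else ([], rest0)
    if PySem.Chars.startswith mr.2 "lib64/".toList || PySem.Chars.startswith mr.2 "lib32/".toList
    then String.ofList ("./".toList ++ mr.1 ++ "lib/".toList ++ PySem.Chars.slice mr.2 (some ((6:Nat):Int)) none)
    else path

-- ===== PRECONDITION & SPEC =====
def Spec_normalize_lib_paths (path : String) (out : String) : Prop := out = normalize_lib_paths_alt path
instance (path : String) (out : String) : Decidable (Spec_normalize_lib_paths path out) := by unfold Spec_normalize_lib_paths; infer_instance

-- ===== CLAIM (what is proved, stated in full; the proofs are below) =====
def Claim_equal_normalize_lib_paths : Prop := ∀ (path : String), Dom_normalize_lib_paths path → Spec_normalize_lib_paths path (normalize_lib_paths path)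

-- ===== LEMMAS AND PROOFS =====

-- splitting a concatenated prefix: (a ++ b) <+: l ↔ a <+: l ∧ b <+: l.drop a.length
theorem pv_prefix_append_iff {α : Type} (a b l : List α) :
    (a ++ b) <+: l ↔ a <+: l ∧ b <+: l.drop a.length := by
  constructor
  · rintro ⟨t, ht⟩
    subst ht
    refine ⟨⟨b ++ t, by simp⟩, ?_⟩
    simp
  · rintro ⟨ha, ⟨t, ht⟩⟩
    refine ⟨t, ?_⟩
    have htake : l.take a.length = a := List.prefix_iff_eq_take.mp ha ▸ rfl
    calc a ++ b ++ t = a ++ (b ++ t) := by rw [List.append_assoc]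
      _ = l.take a.length ++ l.drop a.length := by rw [ht, htake]
      _ = l := List.take_append_drop _ _

-- decompositions of A's concrete prefixes into B's peeled components
theorem pv_splitA64 (l : List Char) : "./lib64/".toList <+: l ↔ ("./".toList <+: l ∧ "lib64/".toList <+: l.drop 2) := by
  simpa using pv_prefix_append_iff "./".toList "lib64/".toList l

theorem pv_splitA32 (l : List Char) : "./lib32/".toList <+: l ↔ ("./".toList <+: l ∧ "lib32/".toList <+: l.drop 2) := by
  simpa using pv_prefix_append_iff "./".toList "lib32/".toList l

theorem pv_splitU64 (l : List Char) : "./usr/lib64/".toList <+: l ↔ ("./".toList <+: l ∧ "usr/".toList <+: l.drop 2 ∧ "lib64/".toList <+: l.drop 6) := by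
  have h1 := pv_prefix_append_iff "./".toList "usr/lib64/".toList l
  have h2 := pv_prefix_append_iff "usr/".toList "lib64/".toList (l.drop 2)
  simp at h1 h2
  simp [h1, h2]

theorem pv_splitU32 (l : List Char) : "./usr/lib32/".toList <+: l ↔ ("./".toList <+: l ∧ "usr/".toList <+: l.drop 2 ∧ "lib32/".toList <+: l.drop 6) := by
  have h1 := pv_prefix_append_iff "./".toList "usr/lib32/".toList l
  have h2 := pv_prefix_append_iff "usr/".toList "lib32/".toList (l.drop 2)
  simp at h1 h2
  simp [h1, h2]

-- incomparable prefixes of the same list: impossible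
theorem pv_prefix_excl {p q l : List Char} (hpq : ¬ p <+: q) (hqp : ¬ q <+: p)
    (hp : p <+: l) (hq : q <+: l) : False := by
  rcases List.prefix_or_prefix_of_prefix hp hq with h | h
  · exact hpq h
  · exact hqp h

theorem normalize_lib_paths_spec : Claim_equal_normalize_lib_paths := by
  intro path _
  unfold Spec_normalize_lib_paths normalize_lib_paths normalize_lib_paths_alt
  simp only [normAloop, PySem.Chars.startswith_iff, PySem.Chars.slice_eq_listSlice,
    PySem.List.slice_from_natCast, pv_splitA64, pv_splitA32, pv_splitU64, pv_splitU32,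
    List.drop_drop]
  by_cases hd2 : ['.', '/'] <+: path.toList
  · by_cases hu : ['u', 's', 'r', '/'] <+: path.toList.drop 2
    · have n64 : ¬ ['l', 'i', 'b', '6', '4', '/'] <+: path.toList.drop 2 :=
        fun h => pv_prefix_excl (by decide) (by decide) hu h
      have n32 : ¬ ['l', 'i', 'b', '3', '2', '/'] <+: path.toList.drop 2 :=
        fun h => pv_prefix_excl (by decide) (by decide) hu h
      by_cases h64 : ['l', 'i', 'b', '6', '4', '/'] <+: path.toList.drop 6
      · simp [PySem.Chars.startswith_iff, hd2, hu, h64, n64, n32, List.drop_drop]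
      · by_cases h32 : ['l', 'i', 'b', '3', '2', '/'] <+: path.toList.drop 6
        · simp [PySem.Chars.startswith_iff, hd2, hu, h64, h32, n64, n32, List.drop_drop]
        · simp [PySem.Chars.startswith_iff, hd2, hu, h64, h32, n64, n32]
    · by_cases h64 : ['l', 'i', 'b', '6', '4', '/'] <+: path.toList.drop 2
      · simp [PySem.Chars.startswith_iff, hd2, hu, h64, List.drop_drop]
      · by_cases h32 : ['l', 'i', 'b', '3', '2', '/'] <+: path.toList.drop 2
        · simp [PySem.Chars.startswith_iff, hd2, hu, h64, h32, List.drop_drop]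
        · simp [PySem.Chars.startswith_iff, hd2, hu, h64, h32]
  · simp [hd2]
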